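-- pv_equiv track=rewrite | github.com/wawzysys/Algorithm | 比赛/timabei/2.py | f
-- ===== SOURCE A (Python) =====
-- def f(s):
--     s = list(s)
--     s1 = s[::-1]
--     a = 0
--     b = 0
--     for i in s:
--         if i == "1":
--             a += 1
--         else:
--             break
--     for i in s1:
--         if i == "1":
--             b += 1
--         else:
--             break
--     return max(a, b)
-- ===== SOURCE B (Python) =====
-- def f(s):
--     lead = 0
--     cur = 0
--     in_prefix = True
--     for ch in s:
--         if ch == "1":
--             cur += 1
--             if in_prefix:
--                 lead += 1
--         else:
--             cur = 0
--             in_prefix = False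
--     return max(lead, cur)
-- ===== Notes on version B (the rewrite author's own statement) =====
-- stated objective: alternative
-- what changed: Replaces A's two staged scans (one over the list, one over a reversed copy, each with early break) by a single pass over the string that maintains the current run length and the frozen leading-run length in one accumulator state, needing no reversal and no second loop.
import Mathlib
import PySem

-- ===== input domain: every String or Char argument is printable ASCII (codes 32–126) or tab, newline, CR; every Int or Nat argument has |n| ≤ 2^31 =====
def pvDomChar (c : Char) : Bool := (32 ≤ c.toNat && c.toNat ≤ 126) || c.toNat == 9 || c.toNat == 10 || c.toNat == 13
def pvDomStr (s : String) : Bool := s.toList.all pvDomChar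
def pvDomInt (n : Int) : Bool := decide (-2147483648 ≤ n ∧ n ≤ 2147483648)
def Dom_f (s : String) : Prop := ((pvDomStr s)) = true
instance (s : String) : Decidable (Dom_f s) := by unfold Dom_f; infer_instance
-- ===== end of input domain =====

-- B replaces A's two staged early-break scans (forward, then over a reversed copy) by one pass
-- maintaining the current run and the frozen leading run in an accumulator (alternative decomposition, same cost).

-- ===== PORT A =====
-- the 'for i in …: if i == "1": a += 1 else: break' loop, transliterated
def fLoop : List Char → Int → Int
  | [], a => a
  | i :: rest, a => if i == '1' then fLoop rest (a + 1) else a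

def f (s : String) : Int :=
  let l := s.toList                                       -- s = list(s)
  let s1 := (PySem.List.slice? l none none (-1)).getD []  -- s1 = s[::-1] (step -1 ≠ 0, always some)
  let a := fLoop l 0
  let b := fLoop s1 0
  max a b

-- ===== PORT B =====
-- single pass: state (lead, cur, in_prefix), transliterating Source B's loop body
def fAltLoop : List Char → Int → Int → Bool → Int
  | [], lead, cur, _ => max lead cur
  | ch :: rest, lead, cur, inPrefix =>
    if ch == '1' then
      fAltLoop rest (if inPrefix then lead + 1 else lead) (cur + 1) inPrefix
    else
      fAltLoop rest lead 0 false

def f_alt (s : String) : Int := fAltLoop s.toList 0 0 true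

-- ===== PRECONDITION & SPEC =====
def Spec_f (s : String) (out : Int) : Prop := out = f_alt s
instance (s : String) (out : Int) : Decidable (Spec_f s out) := by unfold Spec_f; infer_instance

-- ===== CLAIM (what is proved, stated in full; the proofs are below) =====
def Claim_equal_f : Prop := ∀ (s : String), Dom_f s → Spec_f s (f s)

-- ===== LEMMAS AND PROOFS =====
theorem fLoop_eq_takeWhile (l : List Char) (a : Int) :
    fLoop l a = a + ((l.takeWhile (· == '1')).length : Int) := by
  induction l generalizing a with
  | nil => simp [fLoop]
  | cons i rest ih =>
    by_cases h : i = '1'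
    · simp [fLoop, h, List.takeWhile, ih]; ring
    · have hb : (i == '1') = false := beq_eq_false_iff_ne.mpr h
      simp [fLoop, hb, List.takeWhile]

theorem tw_len_ne (xs : List Char) (h : xs.all (· == '1') = false) :
    (xs.takeWhile (· == '1')).length ≠ xs.length := by
  intro hlen
  have hself := (List.takeWhile_prefix (p := (· == '1')) (l := xs)).eq_of_length hlen
  have hall := List.takeWhile_eq_self_iff.mp hself
  exact absurd (List.all_eq_true.mpr hall) (by simp [h])

-- invariant of B's loop: lead accumulates the leading run while in_prefix holds,
-- cur extends through an all-ones suffix, otherwise the trailing run stands alone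
theorem fAltLoop_inv (l : List Char) (lead cur : Int) (inPrefix : Bool) :
    fAltLoop l lead cur inPrefix =
      max (if inPrefix then lead + ((l.takeWhile (· == '1')).length : Int) else lead)
          (if l.all (· == '1') then cur + (l.length : Int)
           else ((l.reverse.takeWhile (· == '1')).length : Int)) := by
  induction l generalizing lead cur inPrefix with
  | nil => cases inPrefix <;> simp [fAltLoop]
  | cons ch rest ih =>
    by_cases h : ch = '1'
    · subst h
      rw [fAltLoop]; simp only [beq_self_eq_true, if_true]; rw [ih]
      by_cases hall : rest.all (· == '1') = true
      · have htw : rest.takeWhile (· == '1') = rest :=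
          List.takeWhile_eq_self_iff.mpr (List.all_eq_true.mp hall)
        simp only [List.all_cons, hall, beq_self_eq_true, Bool.true_and,
          List.takeWhile_cons, List.length_cons, htw]
        cases inPrefix <;> simp <;> ring_nf
      · have hallb : rest.all (· == '1') = false := Bool.eq_false_iff.mpr hall
        have hallc : (('1' :: rest).all (· == '1')) = false := by simp [hallb]
        have hrevall : rest.reverse.all (· == '1') = false := by simpa using hallb
        have hrev : (('1' :: rest).reverse.takeWhile (· == '1')).length
            = (rest.reverse.takeWhile (· == '1')).length := by
          rw [List.reverse_cons, List.takeWhile_append,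
            if_neg (by simpa using tw_len_ne _ hrevall)]
        simp only [hallb, hallc, List.takeWhile_cons, beq_self_eq_true, if_true,
          List.length_cons, hrev]
        cases inPrefix <;> simp <;> ring_nf
    · have hb : (ch == '1') = false := beq_eq_false_iff_ne.mpr h
      rw [fAltLoop]; simp only [hb, Bool.false_eq_true, if_false]; rw [ih]
      have hallc : ((ch :: rest).all (· == '1')) = false := by simp [hb]
      have htwc : ((ch :: rest).takeWhile (· == '1')) = [] := by simp [hb]
      by_cases hall : rest.all (· == '1') = true
      · have hrevall : rest.reverse.all (· == '1') = true := by simpa using hall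
        have htwr : rest.reverse.takeWhile (· == '1') = rest.reverse :=
          List.takeWhile_eq_self_iff.mpr (List.all_eq_true.mp hrevall)
        have hrev : ((ch :: rest).reverse.takeWhile (· == '1')).length
            = rest.length := by
          rw [List.reverse_cons, List.takeWhile_append, if_pos (by rw [htwr]),
            List.length_append]
          simp [hb]
        simp only [hall, hallc, if_true, htwc, hrev, List.length_nil]
        cases inPrefix <;> simp
      · have hallb : rest.all (· == '1') = false := Bool.eq_false_iff.mpr hall
        have hrevall : rest.reverse.all (· == '1') = false := by simpa using hallb
        have hrev : ((ch :: rest).reverse.takeWhile (· == '1')).length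
            = (rest.reverse.takeWhile (· == '1')).length := by
          rw [List.reverse_cons, List.takeWhile_append,
            if_neg (by simpa using tw_len_ne _ hrevall)]
        simp only [hallb, hallc, htwc, hrev, List.length_nil]
        cases inPrefix <;> simp

-- ===== VERDICT (by name: the statement is the Claim_ definition above) =====
theorem f_spec : Claim_equal_f := by
  intro s _
  show f s = f_alt s
  simp only [f, f_alt, PySem.List.slice?_none_none_neg_one, Option.getD_some,
    fLoop_eq_takeWhile, fAltLoop_inv, zero_add, if_true]
  by_cases hall : s.toList.all (· == '1') = true
  · have htw : s.toList.takeWhile (· == '1') = s.toList :=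
      List.takeWhile_eq_self_iff.mpr (List.all_eq_true.mp hall)
    have hrevall : s.toList.reverse.all (· == '1') = true := by simpa using hall
    have htwr : s.toList.reverse.takeWhile (· == '1') = s.toList.reverse :=
      List.takeWhile_eq_self_iff.mpr (List.all_eq_true.mp hrevall)
    simp [hall, htw, htwr]
  · simp [Bool.eq_false_iff.mpr hall]
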